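-- pv_equiv track=rewrite | github.com/deviflw/box-color-preview | Suede/color_extractor_precise.py | create_grid_from_lines
-- ===== SOURCE A (Python) =====
-- def create_grid_from_lines(horizontal_lines, vertical_lines, image_shape):
--     """
--     Create grid squares from detected lines.
--     """
--     height, width = image_shape[:2]
--
--     # Extract y-coordinates from horizontal lines and x-coordinates from vertical lines
--     h_coords = []
--     for line in horizontal_lines:
--         h_coords.append((line[1] + line[3]) // 2)  # Average y coordinate
--
--     v_coords = []
--     for line in vertical_lines:
--         v_coords.append((line[0] + line[2]) // 2)  # Average x coordinate
--
--     # Add image boundaries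
--     h_coords.extend([0, height])
--     v_coords.extend([0, width])
--
--     # Remove duplicates and sort
--     h_coords = sorted(list(set(h_coords)))
--     v_coords = sorted(list(set(v_coords)))
--
--     # Create grid squares
--     squares = []
--     for i in range(len(h_coords) - 1):
--         for j in range(len(v_coords) - 1):
--             x = v_coords[j]
--             y = h_coords[i]
--             w = v_coords[j + 1] - x
--             h = h_coords[i + 1] - y
--
--             # Filter out very small squares
--             if w > 20 and h > 20:
--                 squares.append((x, y, w, h))
--
--     return squares
-- ===== SOURCE B (Python) =====
-- def create_grid_from_lines(horizontal_lines, vertical_lines, image_shape):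
--     """
--     Create grid squares from detected lines.
--     Different algorithm: no sorting and no dedup set.  Each axis's intervals
--     are produced by a successor-chasing loop: start at the minimum coordinate
--     and repeatedly jump to the smallest strictly larger coordinate, emitting
--     the gap whenever it exceeds 20.  Duplicates vanish automatically because
--     the jump is strict; the emission order is the ascending chase order, which
--     equals sorted order.
--     """
--     height, width = image_shape[:2]
--     h_coords = [(l[1] + l[3]) // 2 for l in horizontal_lines] + [0, height]
--     v_coords = [(l[0] + l[2]) // 2 for l in vertical_lines] + [0, width]
--
--     def intervals(coords):
--         out = []
--         cur = min(coords)
--         while True: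
--             bigger = [c for c in coords if c > cur]
--             if not bigger:
--                 return out
--             nxt = min(bigger)
--             if nxt - cur > 20:
--                 out.append((cur, nxt - cur))
--             cur = nxt
--
--     vs = intervals(v_coords)
--     return [(x, y, w, h) for (y, h) in intervals(h_coords) for (x, w) in vs]
-- ===== Notes on version B (the rewrite author's own statement) =====
-- stated objective: alternative
-- what changed: Replaces sorted(set(coords)) plus an index-based double loop over consecutive pairs by a successor-chasing loop per axis: start at the minimum coordinate and repeatedly jump to the smallest strictly larger one, emitting each gap > 20; no sort and no dedup set are used (strict jumps skip duplicates), and the grid is the Cartesian product of the two interval lists.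
import Mathlib
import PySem

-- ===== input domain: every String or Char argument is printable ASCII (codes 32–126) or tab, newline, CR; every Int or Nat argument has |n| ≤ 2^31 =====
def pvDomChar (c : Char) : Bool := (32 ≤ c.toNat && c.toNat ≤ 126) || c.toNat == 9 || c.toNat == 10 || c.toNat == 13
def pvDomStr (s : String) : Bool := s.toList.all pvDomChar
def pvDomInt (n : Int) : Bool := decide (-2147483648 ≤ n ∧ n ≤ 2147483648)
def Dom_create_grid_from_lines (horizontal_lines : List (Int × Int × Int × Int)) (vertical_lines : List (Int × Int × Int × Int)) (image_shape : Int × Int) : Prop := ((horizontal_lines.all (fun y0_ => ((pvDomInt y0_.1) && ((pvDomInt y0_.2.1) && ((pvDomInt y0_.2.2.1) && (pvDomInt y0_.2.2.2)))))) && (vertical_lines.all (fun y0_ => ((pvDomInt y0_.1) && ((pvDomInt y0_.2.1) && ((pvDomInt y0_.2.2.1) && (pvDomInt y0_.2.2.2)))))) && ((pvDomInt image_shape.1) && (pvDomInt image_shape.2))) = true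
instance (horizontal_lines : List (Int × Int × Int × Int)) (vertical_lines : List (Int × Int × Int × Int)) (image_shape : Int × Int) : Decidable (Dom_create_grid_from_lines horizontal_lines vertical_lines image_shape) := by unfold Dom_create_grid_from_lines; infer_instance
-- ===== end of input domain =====

-- B replaces A's sorted(set(...)) + index double loop by a per-axis successor-chasing
-- loop (jump to the smallest strictly larger coordinate, no sort, no dedup set) followed
-- by a Cartesian-product emission; same result, a genuinely different algorithm (not faster).

-- ===== PORT A =====
def create_grid_from_lines (horizontal_lines : List (Int × Int × Int × Int)) (vertical_lines : List (Int × Int × Int × Int)) (image_shape : Int × Int) : List (Int × Int × Int × Int) :=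
  let height := image_shape.1
  let width := image_shape.2
  let h_coords0 := horizontal_lines.foldl (fun acc line => acc ++ [PySem.Int.floordiv (line.2.1 + line.2.2.2) 2]) []
  let v_coords0 := vertical_lines.foldl (fun acc line => acc ++ [PySem.Int.floordiv (line.1 + line.2.2.1) 2]) []
  let h_coords := PySem.List.sorted (PySem.Set.ofList (h_coords0 ++ [0, height])) (fun x => x)
  let v_coords := PySem.List.sorted (PySem.Set.ofList (v_coords0 ++ [0, width])) (fun x => x)
  (PySem.List.pyRange 0 (PySem.List.len h_coords - 1)).foldl (fun squares i =>
    (PySem.List.pyRange 0 (PySem.List.len v_coords - 1)).foldl (fun squares j =>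
      let x := PySem.List.pyGetD v_coords j 0
      let y := PySem.List.pyGetD h_coords i 0
      let w := PySem.List.pyGetD v_coords (j + 1) 0 - x
      let h := PySem.List.pyGetD h_coords (i + 1) 0 - y
      if 20 < w ∧ 20 < h then squares ++ [(x, y, w, h)] else squares) squares) []

-- ===== PORT B =====
-- termination helper for the chase: jumping to a strictly larger member strictly
-- shrinks the list of strictly-larger coordinates
theorem pvChase_measure_lt (l : List Int) (cur nxt : Int) (hlt : cur < nxt) (hm : nxt ∈ l) :
    (l.filter (fun c => decide (nxt < c))).length < (l.filter (fun c => decide (cur < c))).length := by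
  induction l with
  | nil => cases hm
  | cons a t ih =>
    have hmono : (t.filter (fun c => decide (nxt < c))).length ≤ (t.filter (fun c => decide (cur < c))).length := by
      apply List.Sublist.length_le
      apply List.monotone_filter_right
      intro x hx
      simp only [decide_eq_true_eq] at *
      omega
    rcases List.mem_cons.mp hm with rfl | hmt
    · simp only [List.filter_cons]
      have h2 : decide (cur < nxt) = true := by simpa using hlt
      simp [h2]; omega
    · have := ih hmt
      simp only [List.filter_cons]
      by_cases ha : nxt < a
      · have : cur < a := lt_trans hlt ha
        simp [ha, this]; omega
      · by_cases hb : cur < a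
        · simp [ha, hb]; omega
        · simp [ha, hb]; omega

-- the while-loop of Source B's intervals(): cur chases successors, emitting gaps > 20
def pvChase (coords : List Int) (cur : Int) : List (Int × Int) :=
  -- bigger = [c for c in coords if c > cur]; nxt = min(bigger) if any, else stop
  match hb : PySem.List.min? (coords.filter (fun c => decide (cur < c))) (fun x => x) with
  | none => []
  | some nxt =>
      (if 20 < nxt - cur then [(cur, nxt - cur)] else []) ++ pvChase coords nxt
termination_by (coords.filter (fun c => decide (cur < c))).length
decreasing_by
  have hmem : nxt ∈ coords.filter (fun c => decide (cur < c)) := PySem.List.min?_mem hb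
  have hlt : cur < nxt := by
    have := List.of_mem_filter hmem
    simpa using this
  exact pvChase_measure_lt coords cur nxt hlt (List.mem_of_mem_filter hmem)

-- Source B's intervals(): cur starts at min(coords); Python raises on an empty list,
-- which is unreachable here (both coordinate lists contain 0 and a boundary)
def pvIntervals (coords : List Int) : List (Int × Int) :=
  match PySem.List.min? coords (fun x => x) with
  | none => []
  | some cur => pvChase coords cur

def create_grid_from_lines_alt (horizontal_lines : List (Int × Int × Int × Int)) (vertical_lines : List (Int × Int × Int × Int)) (image_shape : Int × Int) : List (Int × Int × Int × Int) :=
  let height := image_shape.1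
  let width := image_shape.2
  let h_coords := (horizontal_lines.map (fun l => PySem.Int.floordiv (l.2.1 + l.2.2.2) 2)) ++ [0, height]
  let v_coords := (vertical_lines.map (fun l => PySem.Int.floordiv (l.1 + l.2.2.1) 2)) ++ [0, width]
  let vs := pvIntervals v_coords
  (pvIntervals h_coords).flatMap (fun yh => vs.map (fun xw => (xw.1, yh.1, xw.2, yh.2)))

-- ===== PRECONDITION & SPEC =====
def Spec_create_grid_from_lines (horizontal_lines : List (Int × Int × Int × Int)) (vertical_lines : List (Int × Int × Int × Int)) (image_shape : Int × Int) (out : List (Int × Int × Int × Int)) : Prop := out = create_grid_from_lines_alt horizontal_lines vertical_lines image_shape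
instance (horizontal_lines : List (Int × Int × Int × Int)) (vertical_lines : List (Int × Int × Int × Int)) (image_shape : Int × Int) (out : List (Int × Int × Int × Int)) : Decidable (Spec_create_grid_from_lines horizontal_lines vertical_lines image_shape out) := by unfold Spec_create_grid_from_lines; infer_instance

-- ===== CLAIM (what is proved, stated in full; the proofs are below) =====
def Claim_equal_create_grid_from_lines : Prop := ∀ (horizontal_lines : List (Int × Int × Int × Int)) (vertical_lines : List (Int × Int × Int × Int)) (image_shape : Int × Int), Dom_create_grid_from_lines horizontal_lines vertical_lines image_shape → Spec_create_grid_from_lines horizontal_lines vertical_lines image_shape (create_grid_from_lines horizontal_lines vertical_lines image_shape)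

-- ===== LEMMAS AND PROOFS =====

-- the interval list computed from consecutive pairs of a coordinate list
def pvPairs (xs : List Int) : List (Int × Int) :=
  ((xs.zip (xs.drop 1)).filter (fun p => 20 < p.2 - p.1)).map (fun p => (p.1, p.2 - p.1))

-- range-indexed fold over consecutive pairs = fold over the zip with the tail
theorem foldl_pyRange_pairs {β : Type} (xs : List Int) (f : β → Int × Int → β) (init : β) :
    (PySem.List.pyRange 0 (PySem.List.len xs - 1)).foldl
      (fun acc j => f acc (PySem.List.pyGetD xs j 0, PySem.List.pyGetD xs (j + 1) 0)) init
    = (xs.zip (xs.drop 1)).foldl f init := by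
  cases xs with
  | nil => simp [pysem]
  | cons a l =>
    have hlen : PySem.List.len (a :: l) - 1 = PySem.List.len ((a :: l).zip ((a :: l).drop 1)) := by
      simp [pysem]
    rw [hlen]
    rw [PySem.List.foldl_congr_mem _ _
      (fun acc j => f acc (PySem.List.pyGetD ((a :: l).zip ((a :: l).drop 1)) j (0, 0))) init ?_]
    · exact PySem.List.foldl_pyRange_zero_pyGetD _ _ f init
    · intro acc x hx
      rw [PySem.List.mem_pyRange_one] at hx
      obtain ⟨h0, h1⟩ := hx
      simp [pysem] at h1
      have hx1' : x < (((a :: l).zip ((a :: l).drop 1)).length : Int) := by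
        simp; omega
      rw [PySem.List.pyGetD_eq_getElem (a :: l) (i := x) _ h0 (by simp; omega)]
      rw [PySem.List.pyGetD_eq_getElem (a :: l) (i := x + 1) _ (by omega) (by simp; omega)]
      show _ = f acc (PySem.List.pyGetD ((a :: l).zip (List.drop 1 (a :: l))) x (0, 0))
      rw [PySem.List.pyGetD_eq_getElem _ (i := x) _ h0 hx1']
      simp [List.getElem_zip]
      congr 2
      have hx2 : (x + 1).toNat = x.toNat + 1 := by omega
      simp [hx2]

theorem grid_core (hc vc : List Int) :
    (PySem.List.pyRange 0 (PySem.List.len hc - 1)).foldl (fun squares i =>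
      (PySem.List.pyRange 0 (PySem.List.len vc - 1)).foldl (fun squares j =>
        let x := PySem.List.pyGetD vc j 0
        let y := PySem.List.pyGetD hc i 0
        let w := PySem.List.pyGetD vc (j + 1) 0 - x
        let h := PySem.List.pyGetD hc (i + 1) 0 - y
        if 20 < w ∧ 20 < h then squares ++ [(x, y, w, h)] else squares) squares) ([] : List (Int × Int × Int × Int))
    = (pvPairs hc).flatMap (fun yh => (pvPairs vc).map (fun xw => (xw.1, yh.1, xw.2, yh.2))) := by
  unfold pvPairs
  have inner : ∀ (y h1 : Int) (sq : List (Int × Int × Int × Int)),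
      (PySem.List.pyRange 0 (PySem.List.len vc - 1)).foldl (fun squares j =>
        if 20 < PySem.List.pyGetD vc (j + 1) 0 - PySem.List.pyGetD vc j 0 ∧ 20 < h1 then
          squares ++ [(PySem.List.pyGetD vc j 0, y, PySem.List.pyGetD vc (j + 1) 0 - PySem.List.pyGetD vc j 0, h1)]
        else squares) sq
      = sq ++ if 20 < h1 then
          ((vc.zip (vc.drop 1)).filter (fun p => 20 < p.2 - p.1)).map (fun p => (p.1, y, p.2 - p.1, h1))
        else [] := by
    intro y h1 sq
    rw [foldl_pyRange_pairs vc (fun sq pv =>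
      if 20 < pv.2 - pv.1 ∧ 20 < h1 then sq ++ [(pv.1, y, pv.2 - pv.1, h1)] else sq) sq]
    by_cases hh : 20 < h1
    · simp only [hh, and_true]
      have := PySem.List.foldl_append_if (fun pv : Int × Int => decide (20 < pv.2 - pv.1))
        (fun pv => (pv.1, y, pv.2 - pv.1, h1)) (vc.zip (vc.drop 1)) sq
      simpa using this
    · simp [hh]
  calc (PySem.List.pyRange 0 (PySem.List.len hc - 1)).foldl _ _
      = (hc.zip (hc.drop 1)).foldl (fun sq ph =>
          sq ++ if 20 < ph.2 - ph.1 then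
            ((vc.zip (vc.drop 1)).filter (fun p => 20 < p.2 - p.1)).map (fun p => (p.1, ph.1, p.2 - p.1, ph.2 - ph.1))
          else []) [] := by
        rw [foldl_pyRange_pairs hc (fun sq ph =>
          (PySem.List.pyRange 0 (PySem.List.len vc - 1)).foldl (fun squares j =>
            if 20 < PySem.List.pyGetD vc (j + 1) 0 - PySem.List.pyGetD vc j 0 ∧ 20 < ph.2 - ph.1 then
              squares ++ [(PySem.List.pyGetD vc j 0, ph.1, PySem.List.pyGetD vc (j + 1) 0 - PySem.List.pyGetD vc j 0, ph.2 - ph.1)]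
            else squares) sq) []]
        exact PySem.List.foldl_congr_mem _ _ _ _ (fun acc ph _ => inner ph.1 (ph.2 - ph.1) acc)
  _   = _ := by
        rw [PySem.List.foldl_append_eq_flatMap]
        simp only [List.nil_append, List.flatMap_map, List.map_map, Function.comp_def, List.drop_one]
        generalize hc.zip hc.tail = L
        induction L with
        | nil => rfl
        | cons a L ih =>
          by_cases h : 20 < a.2 - a.1
          · simp [h, ih]
          · simp [h, ih]

-- unfolding lemmas for the chase loop
theorem pvChase_eq_nil (L : List Int) (cur : Int)
    (h : PySem.List.min? (L.filter (fun c => decide (cur < c))) (fun x => x) = none) :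
    pvChase L cur = [] := by
  rw [pvChase]
  split
  · rfl
  · rename_i nxt heq; rw [h] at heq; cases heq

theorem pvChase_eq_cons (L : List Int) (cur nxt : Int)
    (h : PySem.List.min? (L.filter (fun c => decide (cur < c))) (fun x => x) = some nxt) :
    pvChase L cur = (if 20 < nxt - cur then [(cur, nxt - cur)] else []) ++ pvChase L nxt := by
  rw [pvChase]
  split
  · rename_i heq; rw [h] at heq; cases heq
  · rename_i nxt' heq
    rw [h] at heq
    injection heq with hnn
    rw [hnn]

-- two membership-equal Int lists have the same minimum value
theorem min?_congr_mem (L L' : List Int) (h : ∀ x, x ∈ L ↔ x ∈ L') :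
    PySem.List.min? L (fun x => x) = PySem.List.min? L' (fun x => x) := by
  cases hm : PySem.List.min? L (fun x => x) with
  | none =>
    rw [PySem.List.min?_eq_none_iff] at hm
    have : L' = [] := by
      rw [List.eq_nil_iff_forall_not_mem]
      intro x hx
      exact (List.eq_nil_iff_forall_not_mem.mp hm) x ((h x).mpr hx)
    rw [(PySem.List.min?_eq_none_iff L' _).mpr this]
  | some m =>
    cases hm' : PySem.List.min? L' (fun x => x) with
    | none =>
      rw [PySem.List.min?_eq_none_iff] at hm'
      have := (h m).mp (PySem.List.min?_mem hm)
      simp [hm'] at this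
    | some m' =>
      have h1 : m ≤ m' := PySem.List.min?_isMin hm m' ((h m').mpr (PySem.List.min?_mem hm'))
      have h2 : m' ≤ m := PySem.List.min?_isMin hm' m ((h m).mp (PySem.List.min?_mem hm))
      rw [le_antisymm h1 h2]

-- the chase only depends on the membership of the coordinate list
theorem pvChase_congr : ∀ (n : Nat) (L L' : List Int) (cur : Int),
    (L.filter (fun c => decide (cur < c))).length ≤ n →
    (∀ x, x ∈ L ↔ x ∈ L') → pvChase L cur = pvChase L' cur := by
  intro n
  induction n with
  | zero =>
    intro L L' cur hlen hmem
    have hf : L.filter (fun c => decide (cur < c)) = [] :=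
      List.eq_nil_of_length_eq_zero (Nat.le_zero.mp hlen)
    have hf' : L'.filter (fun c => decide (cur < c)) = [] := by
      rw [List.eq_nil_iff_forall_not_mem]
      intro x hx
      have hx' := List.mem_filter.mp hx
      have : x ∈ L.filter (fun c => decide (cur < c)) :=
        List.mem_filter.mpr ⟨(hmem x).mpr hx'.1, hx'.2⟩
      simp [hf] at this
    rw [pvChase_eq_nil L cur (by rw [hf, PySem.List.min?_eq_none_iff]),
        pvChase_eq_nil L' cur (by rw [hf', PySem.List.min?_eq_none_iff])]
  | succ n ih =>
    intro L L' cur hlen hmem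
    have hfm : ∀ x, x ∈ L.filter (fun c => decide (cur < c)) ↔ x ∈ L'.filter (fun c => decide (cur < c)) := by
      intro x
      simp only [List.mem_filter]
      exact and_congr_left (fun _ => hmem x)
    have hminq := min?_congr_mem _ _ hfm
    cases hm : PySem.List.min? (L.filter (fun c => decide (cur < c))) (fun x => x) with
    | none =>
      rw [pvChase_eq_nil L cur hm, pvChase_eq_nil L' cur (by rw [← hminq, hm])]
    | some nxt =>
      rw [pvChase_eq_cons L cur nxt hm, pvChase_eq_cons L' cur nxt (by rw [← hminq, hm])]
      have hmemf : nxt ∈ L.filter (fun c => decide (cur < c)) := PySem.List.min?_mem hm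
      have hlt : cur < nxt := by
        have := List.of_mem_filter hmemf
        simpa using this
      have hdec := pvChase_measure_lt L cur nxt hlt (List.mem_of_mem_filter hmemf)
      have : (L.filter (fun c => decide (nxt < c))).length ≤ n := by omega
      rw [ih L L' nxt this hmem]

-- on a strictly increasing list the chase reads off consecutive pairs
theorem pvChase_sorted : ∀ (n : Nat) (hc : List Int) (cur : Int),
    List.Pairwise (fun a b => a < b) hc →
    (hc.filter (fun c => decide (cur < c))).length ≤ n →
    pvChase hc cur = pvPairs (cur :: hc.filter (fun c => decide (cur < c))) := by
  intro n
  induction n with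
  | zero =>
    intro hc cur hpw hlen
    have hf : hc.filter (fun c => decide (cur < c)) = [] :=
      List.eq_nil_of_length_eq_zero (Nat.le_zero.mp hlen)
    rw [pvChase_eq_nil hc cur (by rw [hf, PySem.List.min?_eq_none_iff]), hf]
    simp [pvPairs]
  | succ n ih =>
  intro hc cur hpw hlen
  cases hf : hc.filter (fun c => decide (cur < c)) with
  | nil =>
    rw [pvChase_eq_nil hc cur (by rw [hf, PySem.List.min?_eq_none_iff])]
    simp [pvPairs]
  | cons b t =>
    obtain ⟨l1, l2, hsplit, hl1, hpb, ht⟩ := List.filter_eq_cons_iff.mp hf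
    have hpb' : cur < b := by simpa using hpb
    have hl2 : ∀ x ∈ l2, b < x := by
      intro x hx
      have := hpw
      rw [hsplit, List.pairwise_append] at this
      exact (List.pairwise_cons.mp this.2.1).1 x hx
    have hfb : hc.filter (fun c => decide (b < c)) = t := by
      rw [hsplit, List.filter_append, List.filter_cons]
      have e1 : l1.filter (fun c => decide (b < c)) = [] := by
        rw [List.eq_nil_iff_forall_not_mem]
        intro x hx
        have h1 := List.of_mem_filter hx
        have h2 := hl1 x (List.mem_of_mem_filter hx)
        simp only [decide_eq_true_eq] at h1 h2
        omega
      have e3 : l2.filter (fun c => decide (b < c)) = l2 := by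
        rw [List.filter_eq_self]
        intro x hx
        simpa using hl2 x hx
      have e4 : t = l2 := by
        rw [← ht, List.filter_eq_self]
        intro x hx
        have := hl2 x hx
        simp only [decide_eq_true_eq]
        omega
      simp [e1, e3, e4]
    -- the minimum of bigger = b :: t is b
    have hmin : PySem.List.min? (hc.filter (fun c => decide (cur < c))) (fun x => x) = some b := by
      rw [hf]
      cases hm : PySem.List.min? (b :: t) (fun x : Int => x) with
      | none => rw [PySem.List.min?_eq_none_iff] at hm; cases hm
      | some m =>
        have hmem := PySem.List.min?_mem hm
        have hmin' := PySem.List.min?_isMin hm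
        have hmb : m ≤ b := hmin' b (by simp)
        have hbm : b ≤ m := by
          rcases List.mem_cons.mp hmem with rfl | hmt
          · exact le_refl _
          · have : m ∈ l2 := by
              have e4 : t = l2 := by
                rw [← ht, List.filter_eq_self]
                intro x hx
                have := hl2 x hx
                simp only [decide_eq_true_eq]
                omega
              rw [← e4]; exact hmt
            exact le_of_lt (hl2 m this)
        rw [le_antisymm hmb hbm]
    rw [pvChase_eq_cons hc cur b hmin]
    have hlent : (hc.filter (fun c => decide (b < c))).length ≤ n := by
      rw [hfb]
      rw [hf] at hlen
      simp at hlen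
      omega
    rw [ih hc b hpw hlent, hfb]
    -- pvPairs (cur :: b :: t) = (if …) ++ pvPairs (b :: t)
    unfold pvPairs
    simp only [List.drop_one, List.tail_cons, List.zip_cons_cons, List.filter_cons]
    by_cases hgap : 20 < b - cur
    · simp [hgap]
    · simp [hgap]

-- intervals() computes exactly the filtered consecutive pairs of sorted(set(L))
theorem pvIntervals_eq (L : List Int) (hne : L ≠ []) :
    pvIntervals L = pvPairs (PySem.List.sorted (PySem.Set.ofList L) (fun x => x)) := by
  unfold pvIntervals
  have hmemeq : ∀ x, x ∈ L ↔ x ∈ PySem.List.sorted (PySem.Set.ofList L) (fun x => x) := by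
    intro x
    rw [PySem.List.mem_sorted, PySem.Set.mem_ofList]
  cases hm : PySem.List.min? L (fun x => x) with
  | none =>
    rw [PySem.List.min?_eq_none_iff] at hm
    exact absurd hm hne
  | some m =>
    have hpw : List.Pairwise (fun a b : Int => a < b) (PySem.List.sorted (PySem.Set.ofList L) (fun x => x)) := PySem.List.sorted_ofList_pairwise_lt L
    have hmhc : m ∈ PySem.List.sorted (PySem.Set.ofList L) (fun x => x) := (hmemeq m).mp (PySem.List.min?_mem hm)
    obtain ⟨a, tl, hcons⟩ := List.exists_cons_of_ne_nil (List.ne_nil_of_mem hmhc)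
    rw [hcons] at hpw hmhc
    rw [hcons]
    -- the head of the strictly increasing sorted list is the minimum value m of L
    have ham : a = m := by
      have h1 : m ≤ a := PySem.List.min?_isMin hm a ((hmemeq a).mpr (by rw [hcons]; simp))
      have h2 : a ≤ m := by
        rcases List.mem_cons.mp hmhc with rfl | hmt
        · exact le_refl _
        · exact le_of_lt ((List.pairwise_cons.mp hpw).1 m hmt)
      exact le_antisymm h2 h1
    show pvChase L m = pvPairs (a :: tl)
    -- chase L from m = chase on the sorted list from m (same membership)
    rw [pvChase_congr (L.filter (fun c => decide (m < c))).length L (a :: tl) m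
      (le_refl _) (fun x => (hmemeq x).trans (by rw [hcons]))]
    -- on the sorted list the chase reads off consecutive pairs
    rw [pvChase_sorted ((a :: tl).filter (fun c => decide (m < c))).length (a :: tl) m hpw (le_refl _)]
    -- and the filtered suffix is exactly the tail
    have hftl : (a :: tl).filter (fun c => decide (m < c)) = tl := by
      subst ham
      rw [List.filter_cons]
      have e0 : decide (a < a) = false := by simp
      have e1 : tl.filter (fun c => decide (a < c)) = tl := by
        rw [List.filter_eq_self]
        intro x hx
        simpa using (List.pairwise_cons.mp hpw).1 x hx
      simp [e1]
    rw [hftl, ham]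

-- ===== VERDICT (by name: the statement is the Claim_ definition above) =====
theorem create_grid_from_lines_spec : Claim_equal_create_grid_from_lines := by
  intro horizontal_lines vertical_lines image_shape _
  unfold Spec_create_grid_from_lines create_grid_from_lines create_grid_from_lines_alt
  simp only [PySem.List.foldl_append_singleton_eq_map, List.nil_append]
  rw [grid_core]
  rw [pvIntervals_eq _ (by simp), pvIntervals_eq _ (by simp)]
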